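-- pv_equiv track=rewrite | github.com/WhizHack-Tech/package_building_testing | frontend/grouping_epoch_time.py | group_time_by_12_hours
-- ===== SOURCE A (Python) =====
-- def group_time_by_12_hours(start_time, end_time):
--
--     # Calculate the total number of 12-hour intervals
--     total_intervals = 7
--     interval_duration = (end_time - start_time) // total_intervals
--
--     # Initialize the result list
--     result = []
--
--     # Generate start and end times for each 12-hour interval
--     for i in range(total_intervals):
--         interval_start = start_time + (i * interval_duration)
--         interval_end = interval_start + interval_duration
--         result.append((interval_start, interval_end))
--
--     return result
-- ===== SOURCE B (Python) =====
-- def group_time_by_12_hours(start_time, end_time):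
--     dur = (end_time - start_time) // 7
--     def build(hi, k, acc):
--         if k == 0:
--             return acc
--         return build(hi - dur, k - 1, [(hi - dur, hi)] + acc)
--     return build(start_time + 7 * dur, 7, [])
-- ===== Notes on version B (the rewrite author's own statement) =====
-- stated objective: alternative
-- what changed: B builds the interval list back-to-front by recursion, carrying the current upper boundary and subtracting the interval duration, instead of A's front-to-back index loop that recomputes each endpoint by multiplication.
import Mathlib
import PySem

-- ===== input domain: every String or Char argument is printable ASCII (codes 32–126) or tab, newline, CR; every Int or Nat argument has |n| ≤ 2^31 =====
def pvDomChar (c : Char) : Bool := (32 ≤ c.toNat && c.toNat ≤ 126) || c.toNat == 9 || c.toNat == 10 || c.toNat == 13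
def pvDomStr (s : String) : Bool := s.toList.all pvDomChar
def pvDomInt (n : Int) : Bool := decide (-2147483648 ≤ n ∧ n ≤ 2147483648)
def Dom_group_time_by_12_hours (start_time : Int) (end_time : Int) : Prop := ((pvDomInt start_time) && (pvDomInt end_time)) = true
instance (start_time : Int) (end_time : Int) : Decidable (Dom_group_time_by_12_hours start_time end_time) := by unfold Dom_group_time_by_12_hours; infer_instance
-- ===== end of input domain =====

-- B builds the list back-to-front by recursion with a running upper boundary (subtraction); alternative decomposition, same cost.
-- ===== PORT A =====
def group_time_by_12_hours (start_time : Int) (end_time : Int) : List (Int × Int) :=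
  let total_intervals : Int := 7
  let interval_duration : Int := PySem.Int.floordiv (end_time - start_time) total_intervals
  (PySem.List.pyRange 0 total_intervals 1).foldl
    (fun result i =>
      let interval_start := start_time + i * interval_duration
      let interval_end := interval_start + interval_duration
      result ++ [(interval_start, interval_end)])
    []

-- ===== PORT B =====
def pvBuild_group_time (dur : Int) (hi : Int) : Nat → List (Int × Int) → List (Int × Int)
  | 0, acc => acc
  | Nat.succ k, acc => pvBuild_group_time dur (hi - dur) k ((hi - dur, hi) :: acc)

def group_time_by_12_hours_alt (start_time : Int) (end_time : Int) : List (Int × Int) :=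
  let dur := PySem.Int.floordiv (end_time - start_time) 7
  pvBuild_group_time dur (start_time + 7 * dur) 7 []

-- ===== PRECONDITION & SPEC =====
def Spec_group_time_by_12_hours (start_time : Int) (end_time : Int) (out : List (Int × Int)) : Prop := out = group_time_by_12_hours_alt start_time end_time
instance (start_time : Int) (end_time : Int) (out : List (Int × Int)) : Decidable (Spec_group_time_by_12_hours start_time end_time out) := by unfold Spec_group_time_by_12_hours; infer_instance

-- ===== CLAIM =====
def Claim_equal_group_time_by_12_hours : Prop := ∀ (start_time : Int) (end_time : Int), Dom_group_time_by_12_hours start_time end_time → Spec_group_time_by_12_hours start_time end_time (group_time_by_12_hours start_time end_time)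

-- ===== LEMMAS AND PROOFS =====

-- ===== VERDICT =====
theorem group_time_by_12_hours_spec : Claim_equal_group_time_by_12_hours := by
  intro s e _
  unfold Spec_group_time_by_12_hours group_time_by_12_hours group_time_by_12_hours_alt
  simp [PySem.List.pyRange_one, List.range_succ, pvBuild_group_time]
  ring_nf
  simp
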